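-- pv_equiv track=rewrite | github.com/Busygind/LaboratoryWork4--INFORMATICS--ITMO-UNIVERSITY | ParserWithoutLibraries.py | find_repitable_tags
-- ===== SOURCE A (Python) =====
-- def find_repitable_tags(str):
--     repitable_tags = {}
--     for i in range(len(str)):
--         tag_name = str[i][str[i].find('<') + 1:str[i].find('>')].strip()
--         if str.count(str[i]) != 1 and '</' not in str[i]:
--             if tag_name not in repitable_tags:
--                 repitable_tags[tag_name] = 1
--             else:
--                 repitable_tags[tag_name] += 1
--     return repitable_tags
-- ===== SOURCE B (Python) =====
-- def find_repitable_tags(str):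
--     # Group the elements by value in first-occurrence order (one pass), then walk
--     # the groups: each qualifying group contributes its whole multiplicity at once,
--     # with the tag name extracted once per distinct string.
--     counts = {}
--     order = []
--     for s in str:
--         if s in counts:
--             counts[s] += 1
--         else:
--             counts[s] = 1
--             order.append(s)
--     repitable_tags = {}
--     for s in order:
--         c = counts[s]
--         if c != 1 and '</' not in s:
--             tag_name = s[s.find('<') + 1:s.find('>')].strip()
--             repitable_tags[tag_name] = repitable_tags.get(tag_name, 0) + c
--     return repitable_tags
-- ===== Notes on version B (the rewrite author's own statement) =====
-- stated objective: faster
-- what changed: A re-scans the whole list with str.count for every element and bumps the result by 1 per element; B groups the input by value in first-occurrence order in one pass and then iterates over the DISTINCT strings only, adding each group's whole multiplicity at once and extracting the tag name once per group instead of once per element.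
import Mathlib
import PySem

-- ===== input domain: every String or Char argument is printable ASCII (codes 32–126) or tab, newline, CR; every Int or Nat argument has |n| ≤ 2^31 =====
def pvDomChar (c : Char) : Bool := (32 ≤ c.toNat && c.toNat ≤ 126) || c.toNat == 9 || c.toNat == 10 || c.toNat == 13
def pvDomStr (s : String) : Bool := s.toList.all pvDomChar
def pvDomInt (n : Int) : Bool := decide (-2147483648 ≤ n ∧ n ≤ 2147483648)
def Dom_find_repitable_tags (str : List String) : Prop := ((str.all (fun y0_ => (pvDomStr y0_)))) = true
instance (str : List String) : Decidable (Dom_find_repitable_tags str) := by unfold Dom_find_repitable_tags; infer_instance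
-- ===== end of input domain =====

-- B groups the input by value in first-occurrence order and walks the distinct strings once,
-- adding each group's multiplicity in bulk; objective: faster (A re-scans the list per element).

-- the tag-name extraction s[s.find('<') + 1:s.find('>')].strip(), identical in A and Source B
def pvTagName (s : String) : String :=
  PySem.Str.strip
    (PySem.Str.slice s (some (PySem.Str.find s "<" + 1)) (some (PySem.Str.find s ">")))

-- ===== PORT A =====
-- A's loop body for element s = str[i] (tag_name computed before the test, as in A).
def pvStepA (str : List String) (d : PySem.Dict String Int) (s : String) : PySem.Dict String Int :=
  let tag_name := pvTagName s
  if List.count s str ≠ 1 ∧ PySem.Str.isIn "</" s = false then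
    if d.contains tag_name = false then d.insert tag_name 1
    else d.modify tag_name 0 (· + 1)
  else d

-- literal transliteration of A: for i in range(len(str)) with str[i]
-- (i is always in range, so pyGetD with a dummy default is exact).
def find_repitable_tags (str : List String) : List (String × Int) :=
  ((PySem.List.pyRange 0 (str.length : Int) 1).foldl
    (fun d i => pvStepA str d (PySem.List.pyGetD str i "")) PySem.Dict.empty).items

-- ===== PORT B =====
-- Source B's first loop: one step of building (counts, order) — the groups in first-occurrence order.
def pvGroupStep (p : PySem.Dict String Int × List String) (s : String) :
    PySem.Dict String Int × List String :=
  if p.1.contains s then (p.1.modify s 0 (· + 1), p.2)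
  else (p.1.insert s 1, p.2 ++ [s])

-- Source B's second loop body over a distinct string s, adding its whole multiplicity c at once;
-- counts[s] is ported as getD (exact: every s in order is a key of counts).
def pvStepB (counts : PySem.Dict String Int) (d : PySem.Dict String Int) (s : String) :
    PySem.Dict String Int :=
  let c := counts.getD s 0
  if c ≠ 1 ∧ PySem.Str.isIn "</" s = false then
    let tag_name := pvTagName s
    d.insert tag_name (d.getD tag_name 0 + c)
  else d

-- literal transliteration of Source B: group, then walk the distinct strings.
def find_repitable_tags_alt (str : List String) : List (String × Int) :=
  let p := str.foldl pvGroupStep (PySem.Dict.empty, [])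
  (p.2.foldl (pvStepB p.1) PySem.Dict.empty).items

-- ===== PRECONDITION & SPEC =====
def Spec_find_repitable_tags (str : List String) (out : List (String × Int)) : Prop := out = find_repitable_tags_alt str
instance (str : List String) (out : List (String × Int)) : Decidable (Spec_find_repitable_tags str out) := by unfold Spec_find_repitable_tags; infer_instance

-- ===== CLAIM (what is proved, stated in full; the proofs are below) =====
def Claim_equal_find_repitable_tags : Prop := ∀ (str : List String), Dom_find_repitable_tags str → Spec_find_repitable_tags str (find_repitable_tags str)

-- ===== LEMMAS AND PROOFS =====

-- the accumulation 'bump key k by v' to which both loop bodies reduce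
def pvAdd (d : PySem.Dict String Int) (k : String) (v : Int) : PySem.Dict String Int :=
  d.insert k (d.getD k 0 + v)

-- the common shape of both loops: qualification test q, tag key, weight w
def pvStepG (q : String → Bool) (w : String → Int) (d : PySem.Dict String Int) (s : String) :
    PySem.Dict String Int :=
  if q s then pvAdd d (pvTagName s) (w s) else d

-- the qualification test both programs apply (duplicated element, opening tag)
def pvQ (str : List String) (s : String) : Bool :=
  decide (List.count s str ≠ 1 ∧ PySem.Str.isIn "</" s = false)

-- one step of collecting first occurrences (Source B's `order` list)
def pvSeenStep (ord : List String) (s : String) : List String :=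
  if s ∈ ord then ord else ord ++ [s]

theorem pv_modify_eq_add (d : PySem.Dict String Int) (k : String) :
    d.modify k 0 (· + 1) = pvAdd d k 1 := by
  simp [PySem.Dict.modify, pvAdd]

theorem pv_insert_comm (d : PySem.Dict String Int) (k k' : String) (v v' : Int)
    (hk : d.contains k = true) (hne : k' ≠ k) :
    (d.insert k v).insert k' v' = (d.insert k' v').insert k v := by
  have hbe : (k' == k) = false := by simp [hne]
  have hbe' : (k == k') = false := by simp [Ne.symm hne]
  apply PySem.Dict.ext
  rw [PySem.Dict.items_insert ((d.insert k v)) k' v', PySem.Dict.items_insert d k v,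
      PySem.Dict.items_insert ((d.insert k' v')) k v, PySem.Dict.items_insert d k' v',
      PySem.Dict.contains_insert, PySem.Dict.contains_insert, hbe, hbe', hk]
  by_cases h' : d.contains k' = true
  · simp only [h', if_true, Bool.false_or, List.map_map]
    apply List.map_congr_left
    intro p _
    by_cases h1 : p.1 = k' <;> by_cases h2 : p.1 = k <;>
      simp_all [Function.comp]
  · simp only [Bool.not_eq_true] at h'
    simp only [h', Bool.false_or, if_true]
    simp
    exact fun h => absurd h hne

theorem pvAdd_add (d : PySem.Dict String Int) (k : String) (a b : Int) :
    pvAdd (pvAdd d k a) k b = pvAdd d k (a + b) := by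
  unfold pvAdd
  rw [PySem.Dict.getD_insert_self, PySem.Dict.insert_insert_self, add_assoc]

theorem pvAdd_contains (d : PySem.Dict String Int) (k k' : String) (v : Int)
    (h : d.contains k' = true) : (pvAdd d k v).contains k' = true := by
  unfold pvAdd
  rw [PySem.Dict.contains_insert, h, Bool.or_true]
theorem pvStepG_contains (q : String → Bool) (w : String → Int)
    (d : PySem.Dict String Int) (x k : String) (hk : d.contains k = true) :
    (pvStepG q w d x).contains k = true := by
  unfold pvStepG
  split
  · exact pvAdd_contains _ _ _ _ hk
  · exact hk

theorem pvStepG_add_comm (q : String → Bool) (w : String → Int)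
    (d : PySem.Dict String Int) (k : String) (v : Int) (x : String)
    (hk : d.contains k = true) :
    pvStepG q w (pvAdd d k v) x = pvAdd (pvStepG q w d x) k v := by
  unfold pvStepG
  by_cases hq : q x = true
  · simp only [hq, if_true]
    by_cases he : pvTagName x = k
    · rw [he, pvAdd_add, pvAdd_add, add_comm]
    · show pvAdd (pvAdd d k v) (pvTagName x) (w x) = pvAdd (pvAdd d (pvTagName x) (w x)) k v
      unfold pvAdd
      rw [PySem.Dict.getD_insert, PySem.Dict.getD_insert, if_neg he, if_neg (Ne.symm he)]
      exact pv_insert_comm d k (pvTagName x) _ _ hk he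
  · simp only [Bool.not_eq_true] at hq
    simp [hq]

theorem pv_foldl_add (q : String → Bool) (w : String → Int) (L : List String) :
    ∀ (d : PySem.Dict String Int) (k : String) (v : Int), d.contains k = true →
      L.foldl (pvStepG q w) (pvAdd d k v) = pvAdd (L.foldl (pvStepG q w) d) k v := by
  induction L with
  | nil => intro d k v _; rfl
  | cons x r ih =>
    intro d k v hk
    simp only [List.foldl_cons]
    rw [pvStepG_add_comm q w d k v x hk, ih _ _ _ (pvStepG_contains q w d x k hk)]

theorem pv_foldl_skip (q : String → Bool) (w : String → Int) (s : String)
    (hq : q s = false) (t : List String) :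
    ∀ d, t.foldl (pvStepG q w) d = (t.filter (fun x => x != s)).foldl (pvStepG q w) d := by
  induction t with
  | nil => intro d; rfl
  | cons x r ih =>
    intro d
    by_cases hx : x = s
    · subst hx
      simp only [List.foldl_cons, List.filter_cons, bne_self_eq_false]
      rw [show pvStepG q w d x = d by simp [pvStepG, hq]]
      exact ih d
    · simp only [List.foldl_cons, List.filter_cons, bne_iff_ne]
      rw [if_pos hx]
      simp only [List.foldl_cons]
      exact ih _

theorem pv_pull (q : String → Bool) (s : String) (hq : q s = true) (t : List String) :
    ∀ (d : PySem.Dict String Int), d.contains (pvTagName s) = true → 1 ≤ List.count s t →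
      t.foldl (pvStepG q (fun _ => 1)) d
        = pvAdd ((t.filter (fun x => x != s)).foldl (pvStepG q (fun _ => 1)) d)
            (pvTagName s) (List.count s t : Int) := by
  induction t with
  | nil => intro d _ h; simp at h
  | cons x r ih =>
    intro d hd hc
    by_cases hx : x = s
    · subst hx
      simp only [List.foldl_cons, List.filter_cons, bne_self_eq_false,
        List.count_cons_self]
      rw [show pvStepG q (fun _ => 1) d x = pvAdd d (pvTagName x) 1 by simp [pvStepG, hq]]
      by_cases hr : 1 ≤ List.count x r
      · rw [pv_foldl_add q _ r d _ 1 hd, ih d hd hr, pvAdd_add]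
        push_cast; ring_nf
      · have h0 : List.count x r = 0 := by omega
        have hnot : x ∉ r := by rwa [← List.count_eq_zero]
        have hfe : r.filter (fun y => y != x) = r :=
          List.filter_eq_self.mpr (fun a ha => by simp [bne_iff_ne]; rintro rfl; exact hnot ha)
        rw [pv_foldl_add q _ r d _ 1 hd, hfe, h0]
        norm_num
    · have hcr : 1 ≤ List.count s r := by
        rwa [List.count_cons_of_ne hx] at hc
      simp only [List.foldl_cons, List.filter_cons, bne_iff_ne,
        List.count_cons_of_ne hx]
      rw [if_pos hx]
      simp only [List.foldl_cons]
      exact ih (pvStepG q _ d x) (pvStepG_contains q _ d x _ hd) hcr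
theorem pv_seen_mem (l : List String) :
    ∀ (acc : List String) (x : String), x ∈ l.foldl pvSeenStep acc → x ∈ acc ∨ x ∈ l := by
  induction l with
  | nil => intro acc x h; exact Or.inl h
  | cons a t ih =>
    intro acc x h
    rcases ih (pvSeenStep acc a) x h with h' | h'
    · unfold pvSeenStep at h'
      split at h'
      · exact Or.inl h'
      · rcases List.mem_append.mp h' with h'' | h''
        · exact Or.inl h''
        · simp at h''; subst h''; exact Or.inr (List.mem_cons_self)
    · exact Or.inr (List.mem_cons_of_mem a h')

theorem pv_seen_skip (s : String) (t : List String) :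
    ∀ acc, s ∈ acc → t.foldl pvSeenStep acc = (t.filter (fun x => x != s)).foldl pvSeenStep acc := by
  induction t with
  | nil => intro acc _; rfl
  | cons x r ih =>
    intro acc hs
    by_cases hx : x = s
    · subst hx
      simp only [List.foldl_cons, List.filter_cons, bne_self_eq_false]
      rw [show pvSeenStep acc x = acc by simp [pvSeenStep, hs]]
      exact ih acc hs
    · simp only [List.foldl_cons, List.filter_cons, bne_iff_ne]
      rw [if_pos hx]
      simp only [List.foldl_cons]
      refine ih _ ?_
      unfold pvSeenStep
      split
      · exact hs
      · exact List.mem_append_left _ hs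

theorem pv_seen_cons (a : String) (t : List String) (hat : a ∉ t) :
    ∀ acc, t.foldl pvSeenStep (a :: acc) = a :: t.foldl pvSeenStep acc := by
  induction t with
  | nil => intro acc; rfl
  | cons x r ih =>
    intro acc
    have hxa : x ≠ a := fun h => hat (h ▸ List.mem_cons_self)
    have har : a ∉ r := fun h => hat (List.mem_cons_of_mem x h)
    simp only [List.foldl_cons]
    rw [show pvSeenStep (a :: acc) x = a :: pvSeenStep acc x by
      unfold pvSeenStep
      by_cases hm : x ∈ acc
      · rw [if_pos (List.mem_cons_of_mem a hm), if_pos hm]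
      · rw [if_neg (by simp [hxa, hm]), if_neg hm]; rfl]
    exact ih har _
theorem pv_main (q : String → Bool) (l : List String) (e : PySem.Dict String Int) :
    l.foldl (pvStepG q (fun _ => 1)) e
      = (l.foldl pvSeenStep []).foldl (pvStepG q (fun x => (List.count x l : Int))) e := by
  cases l with
  | nil => simp only [List.foldl_nil]
  | cons s t =>
      have hst : s ∉ t.filter (fun x => x != s) := by simp [List.mem_filter]
      have iht := fun e' => pv_main q (t.filter (fun x => x != s)) e'
      have hord : (s :: t).foldl pvSeenStep []
          = s :: (t.filter (fun x => x != s)).foldl pvSeenStep [] := by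
        simp only [List.foldl_cons]
        rw [show pvSeenStep [] s = [s] by simp [pvSeenStep],
            pv_seen_skip s t [s] (by simp)]
        exact pv_seen_cons s _ hst []
      have hw : ∀ e' : PySem.Dict String Int,
          ((t.filter (fun x => x != s)).foldl pvSeenStep []).foldl
              (pvStepG q (fun x => (List.count x (s :: t) : Int))) e'
            = ((t.filter (fun x => x != s)).foldl pvSeenStep []).foldl
              (pvStepG q (fun x => (List.count x (t.filter (fun y => y != s)) : Int))) e' := by
        intro e'
        apply PySem.List.foldl_congr_mem
        intro acc x hx
        have hxt : x ∈ t.filter (fun y => y != s) := by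
          rcases pv_seen_mem _ _ _ hx with h | h
          · simp at h
          · exact h
        have hxs : x ≠ s := by
          have := (List.mem_filter.mp hxt).2; simpa [bne_iff_ne] using this
        have hcount : List.count x (s :: t) = List.count x (t.filter (fun y => y != s)) := by
          rw [List.count_cons_of_ne (Ne.symm hxs), List.count_filter (by simp [hxs])]
        simp only [pvStepG, hcount]
      rw [hord]
      simp only [List.foldl_cons]
      by_cases hq : q s = true
      · have hstep1 : pvStepG q (fun _ => (1 : Int)) e s = pvAdd e (pvTagName s) 1 := by
          simp [pvStepG, hq]
        have hstepW : pvStepG q (fun x => (List.count x (s :: t) : Int)) e s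
            = pvAdd e (pvTagName s) ((List.count s t : Int) + 1) := by
          simp [pvStepG, hq, List.count_cons_self]
        rw [hstep1, hstepW, hw]
        by_cases hc : 1 ≤ List.count s t
        · have hcontains : (pvAdd e (pvTagName s) 1).contains (pvTagName s) = true := by
            unfold pvAdd; exact PySem.Dict.contains_insert_self e _ _
          have hsplit : pvAdd e (pvTagName s) ((List.count s t : Int) + 1)
              = pvAdd (pvAdd e (pvTagName s) 1) (pvTagName s) (List.count s t : Int) := by
            rw [pvAdd_add]; ring_nf
          rw [pv_pull q s hq t _ hcontains hc, iht (pvAdd e (pvTagName s) 1), hsplit,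
              pv_foldl_add _ _ _ _ _ _ hcontains]
        · have h0 : List.count s t = 0 := by omega
          have hfe : t.filter (fun y => y != s) = t :=
            List.filter_eq_self.mpr (fun a ha => by
              simp only [bne_iff_ne, ne_eq]
              rintro rfl
              exact (List.count_eq_zero.mp h0) ha)
          rw [h0]
          norm_num
          rw [← iht (pvAdd e (pvTagName s) 1), hfe]
      · have hq' : q s = false := by simpa using hq
        have hstep : ∀ w : String → Int, pvStepG q w e s = e := by
          intro w; simp [pvStepG, hq']
        rw [hstep, hstep, hw, ← iht e, pv_foldl_skip q _ s hq' t e]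
termination_by l.length
decreasing_by
  have := List.length_filter_le (fun x => x != s) t
  simp only [List.length_cons]
  omega
theorem pv_qiff (str : List String) (s : String) :
    (List.count s str ≠ 1 ∧ PySem.Str.isIn "</" s = false) ↔ pvQ str s = true := by
  simp [pvQ]

theorem pv_qiff' (str : List String) (s : String) :
    ((List.count s str : Int) ≠ 1 ∧ PySem.Str.isIn "</" s = false) ↔ pvQ str s = true := by
  rw [← pv_qiff]
  constructor
  · exact fun h => ⟨by exact_mod_cast h.1, h.2⟩
  · exact fun h => ⟨by exact_mod_cast h.1, h.2⟩

theorem pv_stepA_eq (str : List String) (d : PySem.Dict String Int) (s : String) :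
    pvStepA str d s = pvStepG (pvQ str) (fun _ => 1) d s := by
  unfold pvStepA pvStepG
  by_cases h : pvQ str s = true
  · rw [if_pos ((pv_qiff str s).mpr h), if_pos h]
    by_cases hc : d.contains (pvTagName s) = false
    · rw [if_pos hc]
      unfold pvAdd
      rw [PySem.Dict.getD_of_not_contains d 0 hc, zero_add]
    · rw [if_neg hc, pv_modify_eq_add]
  · rw [if_neg (fun hh => h ((pv_qiff str s).mp hh)), if_neg h]

theorem pv_group_fold (l : List String) :
    ∀ (cd : PySem.Dict String Int) (ord : List String),
      (∀ s, cd.contains s = decide (s ∈ ord)) →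
      l.foldl pvGroupStep (cd, ord)
        = (l.foldl (fun d x => d.modify x 0 (· + 1)) cd, l.foldl pvSeenStep ord) := by
  induction l with
  | nil => intro cd ord _; rfl
  | cons x r ih =>
    intro cd ord hinv
    simp only [List.foldl_cons]
    by_cases hx : x ∈ ord
    · have hcx : cd.contains x = true := by rw [hinv x]; simpa
      rw [show pvGroupStep (cd, ord) x = (cd.modify x 0 (· + 1), ord) by
            simp [pvGroupStep, hcx],
          show pvSeenStep ord x = ord by simp [pvSeenStep, hx]]
      exact ih _ _ (fun s => by
        rw [PySem.Dict.contains_modify, hinv s]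
        by_cases hsx : s = x
        · subst hsx; simp [hx]
        · simp [hsx])
    · have hcx : cd.contains x = false := by rw [hinv x]; simpa
      rw [show pvGroupStep (cd, ord) x = (cd.insert x 1, ord ++ [x]) by
            simp [pvGroupStep, hcx],
          show pvSeenStep ord x = ord ++ [x] by simp [pvSeenStep, hx],
          show cd.insert x 1 = cd.modify x 0 (· + 1) by
            rw [pv_modify_eq_add]
            unfold pvAdd
            rw [PySem.Dict.getD_of_not_contains cd 0 hcx, zero_add]]
      exact ih _ _ (fun s => by
        rw [PySem.Dict.contains_modify, hinv s]
        by_cases hsx : s = x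
        · subst hsx; simp
        · simp [hsx])

theorem pv_stepB_eq (str : List String) (d : PySem.Dict String Int) (s : String) :
    pvStepB (PySem.Dict.counter str) d s
      = pvStepG (pvQ str) (fun x => (List.count x str : Int)) d s := by
  unfold pvStepB pvStepG
  rw [PySem.Dict.getD_counter]
  by_cases h : pvQ str s = true
  · rw [if_pos ((pv_qiff' str s).mpr h), if_pos h]
    rfl
  · rw [if_neg (fun hh => h ((pv_qiff' str s).mp hh)), if_neg h]

-- ===== VERDICT (by name: the statement is the Claim_ definition above) =====
theorem find_repitable_tags_spec : Claim_equal_find_repitable_tags := by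
  intro str _
  unfold Spec_find_repitable_tags
  unfold find_repitable_tags find_repitable_tags_alt
  rw [PySem.List.foldl_pyRange_zero_pyGetD' str "" (pvStepA str) PySem.Dict.empty,
      pv_group_fold str PySem.Dict.empty [] (fun s => by simp)]
  have h1 : pvStepA str = pvStepG (pvQ str) (fun _ => 1) :=
    funext fun d => funext fun s => pv_stepA_eq str d s
  have h2 : str.foldl (fun d x => d.modify x 0 (· + 1)) PySem.Dict.empty
      = PySem.Dict.counter str := (PySem.Dict.counter_eq_foldl str).symm
  have h3 : pvStepB (PySem.Dict.counter str)
      = pvStepG (pvQ str) (fun x => (List.count x str : Int)) :=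
    funext fun d => funext fun s => pv_stepB_eq str d s
  rw [h1, pv_main (pvQ str) str PySem.Dict.empty]
  show _ = ((str.foldl pvSeenStep []).foldl
      (pvStepB (str.foldl (fun d x => d.modify x 0 (· + 1)) PySem.Dict.empty))
      PySem.Dict.empty).items
  rw [h2, h3]
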